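-- pv_equiv track=rewrite | github.com/kellenklein/Course-and-Degree-Requirements | Data-Collection/parseRequisites.py | getFirstOperator
-- ===== SOURCE A (Python) =====
-- def getFirstOperator(requisiteString, operators):
-- 	firstOperator = None
-- 	firstOperatorIndex = None
--
-- 	for operator in operators:
-- 		#get index
-- 		operatorIndex = requisiteString.find(operator)
--
-- 		if operatorIndex != -1:
-- 			#assign if first
-- 			if firstOperatorIndex == None or firstOperatorIndex > operatorIndex:
-- 				firstOperator = operator
-- 				firstOperatorIndex = operatorIndex
--
-- 	return firstOperator
-- ===== SOURCE B (Python) =====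
-- def getFirstOperator(requisiteString, operators):
--     for i in range(len(requisiteString) + 1):
--         for operator in operators:
--             if requisiteString.startswith(operator, i):
--                 return operator
--     return None
-- ===== Notes on version B (the rewrite author's own statement) =====
-- stated objective: faster
-- what changed: Replaces A's operator-major pass of repeated full-string str.find calls plus running-minimum bookkeeping with a string-major left-to-right sweep (startswith at offset) that stops at the earliest matching index.
import Mathlib
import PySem

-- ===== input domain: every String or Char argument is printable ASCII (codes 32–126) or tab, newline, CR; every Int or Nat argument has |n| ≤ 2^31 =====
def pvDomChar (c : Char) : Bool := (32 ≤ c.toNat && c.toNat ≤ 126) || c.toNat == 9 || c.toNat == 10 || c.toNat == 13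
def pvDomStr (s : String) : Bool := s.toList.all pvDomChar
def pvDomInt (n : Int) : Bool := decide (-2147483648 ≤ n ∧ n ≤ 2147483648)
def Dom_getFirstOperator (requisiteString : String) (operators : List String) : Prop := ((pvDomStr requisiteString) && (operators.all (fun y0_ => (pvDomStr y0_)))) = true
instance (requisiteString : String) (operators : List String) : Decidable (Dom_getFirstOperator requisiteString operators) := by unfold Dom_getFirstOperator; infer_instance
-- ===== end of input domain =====

-- B replaces A's operator-major repeated str.find scans with one string-major
-- left-to-right sweep that returns the first operator matching at the earliest
-- index (objective: alternative decomposition; same observable behaviour).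

-- ===== PORT A =====
-- A's loop body: state = (firstOperator, firstOperatorIndex), both None initially.
def pvStepA (s : List Char) (st : Option String × Option Int) (operator : String) :
    Option String × Option Int :=
  let operatorIndex := PySem.Chars.find s operator.toList
  if operatorIndex ≠ -1 then
    match st.2 with
    | none => (some operator, some operatorIndex)     -- firstOperatorIndex == None
    | some j =>
      if j > operatorIndex then (some operator, some operatorIndex) else st
  else st

def getFirstOperator (requisiteString : String) (operators : List String) : Option String :=
  (operators.foldl (pvStepA requisiteString.toList) (none, none)).1

-- ===== PORT B =====
-- outer 'for i in range(len(s)+1): … return' = findSome?; inner 'for operator in operators: … return operator' = find?.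
-- Python's s.startswith(operator, i) for 0 ≤ i is exactly: operator is a prefix of s[i:],
-- ported as PySem.Chars.startswith on (s.toList.drop i).
def getFirstOperator_alt (requisiteString : String) (operators : List String) : Option String :=
  (List.range (requisiteString.toList.length + 1)).findSome? (fun i =>
    operators.find? (fun operator =>
      PySem.Chars.startswith (requisiteString.toList.drop i) operator.toList))

-- ===== PRECONDITION & SPEC =====
def Spec_getFirstOperator (requisiteString : String) (operators : List String) (out : Option String) : Prop := out = getFirstOperator_alt requisiteString operators
instance (requisiteString : String) (operators : List String) (out : Option String) : Decidable (Spec_getFirstOperator requisiteString operators out) := by unfold Spec_getFirstOperator; infer_instance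

-- ===== CLAIM (what is proved, stated in full; the proofs are below) =====
def Claim_equal_getFirstOperator : Prop := ∀ (requisiteString : String) (operators : List String), Dom_getFirstOperator requisiteString operators → Spec_getFirstOperator requisiteString operators (getFirstOperator requisiteString operators)

-- ===== LEMMAS AND PROOFS =====

-- If operator matches at position i, then s.find(operator) is a valid index ≤ i.
theorem pv_prefix_at_find_le (s : List Char) (op : String) (i : Nat)
    (h : op.toList <+: s.drop i) :
    0 ≤ PySem.Chars.find s op.toList ∧ (PySem.Chars.find s op.toList).toNat ≤ i := by
  have hinf : op.toList <:+: s :=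
    (List.IsPrefix.isInfix h).trans (List.drop_suffix i s).isInfix
  have h0 : 0 ≤ PySem.Chars.find s op.toList :=
    (PySem.Chars.find_nonneg_iff s op.toList).mpr hinf
  refine ⟨h0, ?_⟩
  by_contra hlt
  exact (PySem.Chars.find_spec h0).2 i (by omega) h

-- Characterisation of A's fold: either nothing matched, or the state holds the
-- first operator (in list order) achieving the minimal find-index.
theorem pv_foldA_char (s : List Char) (ops : List String) :
    ((ops.foldl (pvStepA s) (none, none) = (none, none) ∧
        ∀ op ∈ ops, PySem.Chars.find s op.toList = -1)
   ∨ (∃ o j l1 l2, ops.foldl (pvStepA s) (none, none) = (some o, some j) ∧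
        PySem.Chars.find s o.toList = j ∧ 0 ≤ j ∧
        (∀ op ∈ ops, PySem.Chars.find s op.toList = -1 ∨ j ≤ PySem.Chars.find s op.toList) ∧
        ops = l1 ++ o :: l2 ∧ ∀ op ∈ l1, PySem.Chars.find s op.toList ≠ j)) := by
  induction ops using List.reverseRecOn with
  | nil => exact Or.inl ⟨rfl, by simp⟩
  | append_singleton ops op ih =>
    rw [List.foldl_append, List.foldl_cons, List.foldl_nil]
    rcases ih with ⟨hst, hall⟩ | ⟨o, j, l1, l2, hst, hfo, hj0, hmin, hsplit, hfirst⟩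
    · rw [hst]
      by_cases hop : PySem.Chars.find s op.toList = -1
      · left
        refine ⟨by simp [pvStepA, hop], ?_⟩
        intro x hx
        rcases List.mem_append.mp hx with hx | hx
        · exact hall x hx
        · simp at hx; subst hx; exact hop
      · right
        have h0 : 0 ≤ PySem.Chars.find s op.toList := by
          have := PySem.Chars.neg_one_le_find s op.toList; omega
        refine ⟨op, PySem.Chars.find s op.toList, ops, [], by simp [pvStepA, hop], rfl, h0,
          ?_, by simp, ?_⟩
        · intro x hx
          rcases List.mem_append.mp hx with hx | hx
          · exact Or.inl (hall x hx)
          · simp at hx; subst hx; exact Or.inr le_rfl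
        · intro x hx
          rw [hall x hx]; omega
    · rw [hst]
      by_cases hop : PySem.Chars.find s op.toList = -1
      · right
        refine ⟨o, j, l1, l2 ++ [op], by simp [pvStepA, hop], hfo, hj0, ?_,
          by rw [hsplit]; simp, hfirst⟩
        intro x hx
        rcases List.mem_append.mp hx with hx | hx
        · exact hmin x hx
        · simp at hx; subst hx; exact Or.inl hop
      · by_cases hlt : j > PySem.Chars.find s op.toList
        · right
          have h0 : 0 ≤ PySem.Chars.find s op.toList := by
            have := PySem.Chars.neg_one_le_find s op.toList; omega
          refine ⟨op, PySem.Chars.find s op.toList, ops, [],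
            by simp [pvStepA, hop, hlt], rfl, h0, ?_, by simp, ?_⟩
          · intro x hx
            rcases List.mem_append.mp hx with hx | hx
            · rcases hmin x hx with h | h
              · exact Or.inl h
              · exact Or.inr (by omega)
            · simp at hx; subst hx; exact Or.inr le_rfl
          · intro x hx heq
            rcases hmin x hx with h | h
            · omega
            · omega
        · right
          refine ⟨o, j, l1, l2 ++ [op], ?_, hfo, hj0, ?_, by rw [hsplit]; simp, hfirst⟩
          · simp [pvStepA, hop, hlt]
          · intro x hx
            rcases List.mem_append.mp hx with hx | hx
            · exact hmin x hx
            · simp at hx; subst hx; exact Or.inr (by omega)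

-- ===== VERDICT (by name: the statement is the Claim_ definition above) =====
theorem getFirstOperator_spec : Claim_equal_getFirstOperator := by
  intro rs ops _
  unfold Spec_getFirstOperator getFirstOperator getFirstOperator_alt
  set s := rs.toList with hs
  rcases pv_foldA_char s ops with ⟨hst, hall⟩ | ⟨o, j, l1, l2, hst, hfo, hj0, hmin, hsplit, hfirst⟩
  · -- nothing matches anywhere: both sides are none
    rw [hst]
    symm
    rw [List.findSome?_eq_none_iff]
    intro i _
    rw [List.find?_eq_none]
    intro op hop hsw
    have hpre := (PySem.Chars.startswith_iff _ _).mp hsw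
    have := (pv_prefix_at_find_le s op i hpre).1
    rw [hall op hop] at this
    omega
  · rw [hst]
    -- the earliest matching position is k = j.toNat ≤ len s
    have hkle : j.toNat ≤ s.length := by
      have := PySem.Chars.find_le_length s o.toList
      omega
    -- no operator matches at any position i < j.toNat
    have hnone : ∀ i, i < j.toNat →
        ops.find? (fun op => PySem.Chars.startswith (s.drop i) op.toList) = none := by
      intro i hi
      rw [List.find?_eq_none]
      intro op hop hsw
      have hpre := (PySem.Chars.startswith_iff _ _).mp hsw
      obtain ⟨h0, hle⟩ := pv_prefix_at_find_le s op i hpre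
      rcases hmin op hop with h | h
      · omega
      · omega
    -- at position j.toNat the first matching operator is o
    have hhit : ops.find? (fun op => PySem.Chars.startswith (s.drop j.toNat) op.toList)
        = some o := by
      rw [hsplit, List.find?_append]
      have hl1 : l1.find? (fun op => PySem.Chars.startswith (s.drop j.toNat) op.toList)
          = none := by
        rw [List.find?_eq_none]
        intro op hop hsw
        have hpre := (PySem.Chars.startswith_iff _ _).mp hsw
        obtain ⟨h0, hle⟩ := pv_prefix_at_find_le s op j.toNat hpre
        rcases hmin op (by rw [hsplit]; exact List.mem_append.mpr (Or.inl hop)) with h | h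
        · omega
        · exact hfirst op hop (by omega)
      have ho : PySem.Chars.startswith (s.drop j.toNat) o.toList = true := by
        rw [PySem.Chars.startswith_iff]
        have := PySem.Chars.find_spec (s := s) (sub := o.toList) (by omega)
        rw [hfo] at this
        exact this.1
      rw [hl1, List.find?_cons, ho]
      rfl
    -- split the range at j.toNat
    have hrange : List.range (s.length + 1)
        = List.range j.toNat ++ (List.range (s.length + 1 - j.toNat)).map (j.toNat + ·) := by
      rw [← List.range_add]
      congr 1
      omega
    rw [hrange, List.findSome?_append]
    have h1 : (List.range j.toNat).findSome? (fun i =>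
        ops.find? (fun op => PySem.Chars.startswith (s.drop i) op.toList)) = none := by
      rw [List.findSome?_eq_none_iff]
      intro i hi
      exact hnone i (List.mem_range.mp hi)
    have h2 : ((List.range (s.length + 1 - j.toNat)).map (j.toNat + ·)).findSome? (fun i =>
        ops.find? (fun op => PySem.Chars.startswith (s.drop i) op.toList)) = some o := by
      have hlen : 0 < s.length + 1 - j.toNat := by omega
      obtain ⟨m, hm⟩ : ∃ m, s.length + 1 - j.toNat = m + 1 := ⟨s.length - j.toNat, by omega⟩
      rw [hm, List.range_succ_eq_map]
      simp only [List.map_cons, List.findSome?_cons]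
      rw [Nat.add_zero, hhit]
    rw [h1, h2]
    rfl
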